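-- pv_equiv track=rewrite | github.com/liupengsay/PyIsTheBestLang | src/mathmatics/high_precision/template.py | factorial_to_factorial
-- ===== SOURCE A (Python) =====
-- def factorial_to_factorial(n):
--     """Compute number of suffixes 0 with 1!*2!***n!"""
--     ans = 0
--     num = 5
--     while num <= n:
--         ans += num * (n // num) * (n // num - 1) // 2
--         ans += (n // num) * (n % num + 1)
--         num *= 5
--     return ans
-- ===== SOURCE B (Python) =====
-- def factorial_to_factorial(n):
--     """Compute number of suffixes 0 with 1!*2!***n!"""
--     # v5(k!) = (k - s5(k)) / 4 where s5 = base-5 digit sum (Legendre), so the answer is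
--     # (sum_{k=1}^n k - sum_{k=1}^n s5(k)) / 4; the digit sums are totalled position by position.
--     if n <= 0:
--         return 0
--     digit_sum = 0
--     p = 1
--     while p <= n:
--         high = n // (5 * p)
--         cur = (n // p) % 5
--         low = n % p
--         digit_sum += high * 10 * p + cur * (cur - 1) // 2 * p + cur * (low + 1)
--         p *= 5
--     return (n * (n + 1) // 2 - digit_sum) // 4
-- ===== Notes on version B (the rewrite author's own statement) =====
-- stated objective: alternative
-- what changed: B uses Legendre's digit-sum identity v5(k!) = (k - s5(k))/4: it totals the base-5 digit sums of 1..n position by position (high/cur/low split per power of 5) and returns (n(n+1)/2 - digit_sum)/4, instead of A's per-power-of-5 closed-form summation of floor(k/5^j).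
import Mathlib
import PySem

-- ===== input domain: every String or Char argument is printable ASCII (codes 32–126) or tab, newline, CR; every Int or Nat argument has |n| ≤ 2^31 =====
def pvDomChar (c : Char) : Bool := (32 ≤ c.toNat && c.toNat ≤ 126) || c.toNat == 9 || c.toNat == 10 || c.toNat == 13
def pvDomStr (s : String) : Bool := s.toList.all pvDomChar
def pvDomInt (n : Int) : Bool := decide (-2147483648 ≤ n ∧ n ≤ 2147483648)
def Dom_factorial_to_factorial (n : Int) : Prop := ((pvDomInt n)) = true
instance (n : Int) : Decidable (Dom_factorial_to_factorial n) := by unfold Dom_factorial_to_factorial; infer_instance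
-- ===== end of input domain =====

-- B replaces A's per-power-of-5 summation of floor(k/5^j) by Legendre's digit-sum identity
-- v5(k!) = (k - s5(k))/4: it totals the base-5 digit sums of 1..n position by position and
-- returns (n(n+1)/2 - digit_sum)/4 (alternative decomposition; not claimed faster).

-- ===== PORT A =====
-- while num <= n: ans += num*(n//num)*(n//num-1)//2 + (n//num)*(n%num+1); num *= 5
-- (the '0 < num' conjunct is a termination guard only: A is entered with num = 5 and
--  multiplies by 5, so num is always positive on reachable states)
def aLoop (n num ans : Int) : Int :=
  if _h : 0 < num ∧ num ≤ n then
    aLoop n (num * 5)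
      (ans + PySem.Int.floordiv (num * PySem.Int.floordiv n num * (PySem.Int.floordiv n num - 1)) 2
           + PySem.Int.floordiv n num * (PySem.Int.mod n num + 1))
  else ans
termination_by (n + 1 - num).toNat
decreasing_by omega

def factorial_to_factorial (n : Int) : Int := aLoop n 5 0

-- ===== PORT B =====
-- while p <= n: high = n//(5*p); cur = (n//p)%5; low = n%p;
--               digit_sum += high*10*p + cur*(cur-1)//2*p + cur*(low+1); p *= 5
-- (the '0 < p' conjunct is a termination guard only: the loop is entered with p = 1 and
--  multiplies by 5, so p is always positive on reachable states)
def bLoop (n p ds : Int) : Int :=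
  if _h : 0 < p ∧ p ≤ n then
    let high := PySem.Int.floordiv n (5 * p)
    let cur := PySem.Int.mod (PySem.Int.floordiv n p) 5
    let low := PySem.Int.mod n p
    bLoop n (p * 5)
      (ds + (high * 10 * p + PySem.Int.floordiv (cur * (cur - 1)) 2 * p + cur * (low + 1)))
  else ds
termination_by (n + 1 - p).toNat
decreasing_by omega

def factorial_to_factorial_alt (n : Int) : Int :=
  if n ≤ 0 then 0
  else PySem.Int.floordiv (PySem.Int.floordiv (n * (n + 1)) 2 - bLoop n 1 0) 4

-- ===== PRECONDITION & SPEC =====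
def Spec_factorial_to_factorial (n : Int) (out : Int) : Prop := out = factorial_to_factorial_alt n
instance (n : Int) (out : Int) : Decidable (Spec_factorial_to_factorial n out) := by unfold Spec_factorial_to_factorial; infer_instance

-- ===== CLAIM (what is proved, stated in full; the proofs are below) =====
def Claim_equal_factorial_to_factorial : Prop := ∀ (n : Int), Dom_factorial_to_factorial n → Spec_factorial_to_factorial n (factorial_to_factorial n)

-- ===== LEMMAS AND PROOFS =====

-- ∑_{k=1}^{N} k / p
def sdiv (p N : ℕ) : ℕ := ∑ k ∈ Finset.Icc 1 N, k / p

-- ∑_{k=1}^{N} base-5 digit of k at position given by p (= (k/p) % 5)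
def dsum (p N : ℕ) : ℕ := ∑ k ∈ Finset.Icc 1 N, (k / p) % 5

lemma gauss_div (p q : ℕ) : p * q * (q - 1) / 2 = p * ∑ i ∈ Finset.range q, i := by
  have h := Finset.sum_range_id_mul_two q
  calc p * q * (q - 1) / 2 = (p * ∑ i ∈ Finset.range q, i) * 2 / 2 := by
        rw [mul_assoc, ← h]; ring_nf
    _ = p * ∑ i ∈ Finset.range q, i := Nat.mul_div_cancel _ two_pos

lemma closedN (p N : ℕ) :
    p * (∑ i ∈ Finset.range (N / p), i) + (N / p) * (N % p + 1) = sdiv p N := by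
  induction N with
  | zero => simp [sdiv]
  | succ N ih =>
    have hstep : sdiv p (N + 1) = sdiv p N + (N + 1) / p := by
      unfold sdiv
      rw [Finset.sum_Icc_succ_top (by omega : 1 ≤ N + 1)]
    rw [hstep, ← ih]
    have hsd : (N + 1) / p = N / p + if p ∣ N + 1 then 1 else 0 := Nat.succ_div
    have hdm1 := Nat.div_add_mod N p
    have hdm2 := Nat.div_add_mod (N + 1) p
    by_cases hd : p ∣ (N + 1)
    · have hq : (N + 1) / p = N / p + 1 := by rw [hsd]; simp [hd]
      have hr0 : (N + 1) % p = 0 := by obtain ⟨c, hc⟩ := hd; simp [hc]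
      rw [hq, hr0] at hdm2
      rw [Nat.mul_succ] at hdm2
      have hrp : N % p + 1 = p := by omega
      rw [hq, hr0, Finset.sum_range_succ, hrp]
      ring
    · have hq : (N + 1) / p = N / p := by rw [hsd]; simp [hd]
      have hr : (N + 1) % p = N % p + 1 := by
        rw [hq] at hdm2; omega
      rw [hq, hr]
      have : (N / p) * (N % p + 1 + 1) = (N / p) * (N % p + 1) + N / p := by ring
      omega

lemma sdiv_eq_zero {p N : ℕ} (h : N < p) : sdiv p N = 0 := by
  unfold sdiv
  apply Finset.sum_eq_zero
  intro k hk
  rw [Finset.mem_Icc] at hk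
  exact Nat.div_eq_of_lt (by omega)

lemma dsum_eq_zero {p N : ℕ} (h : N < p) : dsum p N = 0 := by
  unfold dsum
  apply Finset.sum_eq_zero
  intro k hk
  rw [Finset.mem_Icc] at hk
  rw [Nat.div_eq_of_lt (by omega)]
  rfl

-- the body added by one iteration of A's loop, as the cast of a Nat value
lemma Cexpr (a b : ℕ) :
    PySem.Int.floordiv ((b : ℤ) * PySem.Int.floordiv (a : ℤ) (b : ℤ) * (PySem.Int.floordiv (a : ℤ) (b : ℤ) - 1)) 2
      + PySem.Int.floordiv (a : ℤ) (b : ℤ) * (PySem.Int.mod (a : ℤ) (b : ℤ) + 1)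
    = ((sdiv b a : ℕ) : ℤ) := by
  rw [PySem.Int.floordiv_natCast, PySem.Int.mod_natCast, ← closedN b a]
  rcases Nat.eq_zero_or_pos (a / b) with hq | hq
  · simp only [hq, Nat.cast_zero, mul_zero, zero_mul, zero_sub]
    simp
  · have h1 : ((a / b : ℕ) : ℤ) - 1 = ((a / b - 1 : ℕ) : ℤ) := by omega
    rw [h1,
      show ((b : ℤ) * ((a / b : ℕ) : ℤ) * ((a / b - 1 : ℕ) : ℤ)) = ((b * (a / b) * (a / b - 1) : ℕ) : ℤ) by
        push_cast; ring,
      show (2 : ℤ) = ((2 : ℕ) : ℤ) from rfl, PySem.Int.floordiv_natCast, gauss_div]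
    push_cast
    ring

lemma aLoop_eq (n : Int) (hn : 0 ≤ n) :
    ∀ (m : ℕ) (num ans : Int), 0 < num → n < num * 5 ^ m →
      aLoop n num ans = ans + ((∑ j ∈ Finset.range m, sdiv (num.toNat * 5 ^ j) n.toNat : ℕ) : ℤ) := by
  intro m
  induction m with
  | zero =>
    intro num ans hnum hlt
    rw [aLoop, dif_neg (by omega)]
    simp
  | succ m ih =>
    intro num ans hnum hlt
    by_cases hle : num ≤ n
    · rw [aLoop, dif_pos ⟨hnum, hle⟩]
      have ha : n = ((n.toNat : ℕ) : ℤ) := by omega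
      have hb : num = ((num.toNat : ℕ) : ℤ) := by omega
      have hC : (PySem.Int.floordiv (num * PySem.Int.floordiv n num * (PySem.Int.floordiv n num - 1)) 2
           + PySem.Int.floordiv n num * (PySem.Int.mod n num + 1)) = ((sdiv num.toNat n.toNat : ℕ) : ℤ) := by
        rw [ha, hb]; exact Cexpr n.toNat num.toNat
      rw [ih (num * 5) _ (by omega) (by
        have h5 : num * 5 * 5 ^ m = num * 5 ^ (m + 1) := by ring
        rw [h5]; exact hlt)]
      have htn : (num * 5).toNat = num.toNat * 5 := by omega
      have hre : ∀ j, (num * 5).toNat * 5 ^ j = num.toNat * 5 ^ (j + 1) := by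
        intro j; rw [htn]; ring
      rw [show (∑ j ∈ Finset.range m, sdiv ((num * 5).toNat * 5 ^ j) n.toNat)
            = ∑ j ∈ Finset.range m, sdiv (num.toNat * 5 ^ (j + 1)) n.toNat from
          Finset.sum_congr rfl (fun j _ => by rw [hre j])]
      rw [Finset.sum_range_succ']
      simp only [pow_zero, mul_one]
      rw [Nat.cast_add]
      linear_combination hC
    · rw [aLoop, dif_neg (by omega)]
      have hz : ∀ j ∈ Finset.range (m + 1), sdiv (num.toNat * 5 ^ j) n.toNat = 0 := by
        intro j _
        apply sdiv_eq_zero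
        have h1 : num.toNat ≤ num.toNat * 5 ^ j :=
          Nat.le_mul_of_pos_right _ (Nat.pow_pos (by omega))
        omega
      rw [Finset.sum_eq_zero hz]
      simp

-- doubled Gauss sum, in ℤ
lemma gauss2 (m : ℕ) : ((∑ i ∈ Finset.range m, i : ℕ) : ℤ) * 2 = (m : ℤ) * ((m : ℤ) - 1) := by
  rcases m with _ | m
  · simp
  · have h : (∑ i ∈ Finset.range (m + 1), i) * 2 = (m + 1) * m := by
      simpa using Finset.sum_range_id_mul_two (m + 1)
    have h' : ((∑ i ∈ Finset.range (m + 1), i : ℕ) : ℤ) * 2 = (((m + 1) * m : ℕ) : ℤ) := by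
      exact_mod_cast congrArg (fun t : ℕ => (t : ℤ)) h
    push_cast at h' ⊢
    linarith

-- cur*(cur-1)//2 as a Gauss sum, for cur a Nat cast
lemma cc2 (c : ℕ) :
    PySem.Int.floordiv ((c : ℤ) * ((c : ℤ) - 1)) 2 = ((∑ i ∈ Finset.range c, i : ℕ) : ℤ) := by
  rcases c with _ | c
  · simp [PySem.Int.floordiv]
  · have h1 : ((c + 1 : ℕ) : ℤ) - 1 = ((c : ℕ) : ℤ) := by push_cast; ring
    rw [h1, show (((c + 1 : ℕ) : ℤ) * ((c : ℕ) : ℤ)) = (((c + 1) * c : ℕ) : ℤ) by push_cast; ring,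
      show (2 : ℤ) = ((2 : ℕ) : ℤ) from rfl, PySem.Int.floordiv_natCast]
    have h := Finset.sum_range_id_mul_two (c + 1)
    rw [show (c + 1) - 1 = c from rfl] at h
    omega

-- dsum splits into two sdiv levels
lemma dsum_split (p N : ℕ) :
    ((dsum p N : ℕ) : ℤ) = ((sdiv p N : ℕ) : ℤ) - 5 * ((sdiv (p * 5) N : ℕ) : ℤ) := by
  unfold dsum sdiv
  rw [Nat.cast_sum, Nat.cast_sum, Nat.cast_sum, Finset.mul_sum, ← Finset.sum_sub_distrib]
  apply Finset.sum_congr rfl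
  intro k _
  have hdd : k / (p * 5) = k / p / 5 := (Nat.div_div_eq_div_mul k p 5).symm
  have hdm := Nat.div_add_mod (k / p) 5
  rw [hdd]
  omega

-- the body added by one iteration of B's loop, as the cast of dsum
lemma CexprB (a b : ℕ) :
    PySem.Int.floordiv (a : ℤ) (5 * (b : ℤ)) * 10 * (b : ℤ)
      + PySem.Int.floordiv
          (PySem.Int.mod (PySem.Int.floordiv (a : ℤ) (b : ℤ)) 5
            * (PySem.Int.mod (PySem.Int.floordiv (a : ℤ) (b : ℤ)) 5 - 1)) 2 * (b : ℤ)
      + PySem.Int.mod (PySem.Int.floordiv (a : ℤ) (b : ℤ)) 5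
          * (PySem.Int.mod (a : ℤ) (b : ℤ) + 1)
    = ((dsum b a : ℕ) : ℤ) := by
  rw [show (5 * (b : ℤ)) = ((5 * b : ℕ) : ℤ) by push_cast; ring,
    PySem.Int.floordiv_natCast, PySem.Int.floordiv_natCast, PySem.Int.mod_natCast,
    show (5 : ℤ) = ((5 : ℕ) : ℤ) from rfl, PySem.Int.mod_natCast, cc2,
    dsum_split, ← closedN b a, ← closedN (b * 5) a]
  -- name the Nat quantities
  have hmc : a / (5 * b) = a / (b * 5) := by rw [Nat.mul_comm]
  rw [hmc]
  set q := a / b with hq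
  set Q := a / (b * 5) with hQ
  set c := (a / b) % 5 with hc
  set r := a % b with hr
  set R := a % (b * 5) with hR
  have g1 := gauss2 q
  have g2 := gauss2 Q
  have g3 := gauss2 c
  have e4 : (q : ℤ) = 5 * (Q : ℤ) + (c : ℤ) := by
    have h1 : a / (b * 5) = a / b / 5 := (Nat.div_div_eq_div_mul a b 5).symm
    have h2 := Nat.div_add_mod (a / b) 5
    rw [hQ, h1]
    push_cast
    omega
  have e5 : (b : ℤ) * (q : ℤ) + (r : ℤ) = (b : ℤ) * 5 * (Q : ℤ) + (R : ℤ) := by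
    have h1 := Nat.div_add_mod a b
    have h2 := Nat.div_add_mod a (b * 5)
    have h3 : b * q + r = b * 5 * Q + R := by
      rw [hq, hr, hQ, hR]; exact h1.trans h2.symm
    exact_mod_cast congrArg (fun t : ℕ => (t : ℤ)) h3
  -- prove the doubled identity, then cancel the factor 2
  have hdb :
      2 * (((Q : ℤ)) * 10 * (b : ℤ) + ((∑ i ∈ Finset.range c, i : ℕ) : ℤ) * (b : ℤ)
          + (c : ℤ) * ((r : ℤ) + 1))
      = 2 * ((((b : ℤ) * ((∑ i ∈ Finset.range q, i : ℕ) : ℤ) + (q : ℤ) * ((r : ℤ) + 1)))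
          - 5 * ((b : ℤ) * 5 * ((∑ i ∈ Finset.range Q, i : ℕ) : ℤ) + (Q : ℤ) * ((R : ℤ) + 1))) := by
    linear_combination (-(b : ℤ)) * g1 + 25 * (b : ℤ) * g2 + (b : ℤ) * g3
      + (-2 * ((r : ℤ) + 1) + 10 * (Q : ℤ) * (b : ℤ) - (b : ℤ) * ((q : ℤ) + 5 * (Q : ℤ) + (c : ℤ) - 1)) * e4
      + (-10 * (Q : ℤ)) * e5
  have hgoal :
      ((Q : ℤ)) * 10 * (b : ℤ) + ((∑ i ∈ Finset.range c, i : ℕ) : ℤ) * (b : ℤ)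
          + (c : ℤ) * ((r : ℤ) + 1)
      = (((b : ℤ) * ((∑ i ∈ Finset.range q, i : ℕ) : ℤ) + (q : ℤ) * ((r : ℤ) + 1)))
          - 5 * ((b : ℤ) * 5 * ((∑ i ∈ Finset.range Q, i : ℕ) : ℤ) + (Q : ℤ) * ((R : ℤ) + 1)) := by
    omega
  push_cast
  push_cast at hgoal
  linarith [hgoal]

lemma bLoop_eq (n : Int) (hn : 0 ≤ n) :
    ∀ (m : ℕ) (p ds : Int), 0 < p → n < p * 5 ^ m →
      bLoop n p ds = ds + ((∑ j ∈ Finset.range m, dsum (p.toNat * 5 ^ j) n.toNat : ℕ) : ℤ) := by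
  intro m
  induction m with
  | zero =>
    intro p ds hp hlt
    rw [bLoop, dif_neg (by omega)]
    simp
  | succ m ih =>
    intro p ds hp hlt
    by_cases hle : p ≤ n
    · rw [bLoop, dif_pos ⟨hp, hle⟩]
      have ha : n = ((n.toNat : ℕ) : ℤ) := by omega
      have hb : p = ((p.toNat : ℕ) : ℤ) := by omega
      have hC : (PySem.Int.floordiv n (5 * p) * 10 * p
          + PySem.Int.floordiv
              (PySem.Int.mod (PySem.Int.floordiv n p) 5
                * (PySem.Int.mod (PySem.Int.floordiv n p) 5 - 1)) 2 * p
          + PySem.Int.mod (PySem.Int.floordiv n p) 5 * (PySem.Int.mod n p + 1))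
          = ((dsum p.toNat n.toNat : ℕ) : ℤ) := by
        rw [ha, hb]; exact CexprB n.toNat p.toNat
      simp only []
      rw [ih (p * 5) _ (by omega) (by
        have h5 : p * 5 * 5 ^ m = p * 5 ^ (m + 1) := by ring
        rw [h5]; exact hlt)]
      have htn : (p * 5).toNat = p.toNat * 5 := by omega
      have hre : ∀ j, (p * 5).toNat * 5 ^ j = p.toNat * 5 ^ (j + 1) := by
        intro j; rw [htn]; ring
      rw [show (∑ j ∈ Finset.range m, dsum ((p * 5).toNat * 5 ^ j) n.toNat)
            = ∑ j ∈ Finset.range m, dsum (p.toNat * 5 ^ (j + 1)) n.toNat from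
          Finset.sum_congr rfl (fun j _ => by rw [hre j])]
      rw [Finset.sum_range_succ']
      simp only [pow_zero, mul_one]
      rw [Nat.cast_add]
      linear_combination hC
    · rw [bLoop, dif_neg (by omega)]
      have hz : ∀ j ∈ Finset.range (m + 1), dsum (p.toNat * 5 ^ j) n.toNat = 0 := by
        intro j _
        apply dsum_eq_zero
        have h1 : p.toNat ≤ p.toNat * 5 ^ j :=
          Nat.le_mul_of_pos_right _ (Nat.pow_pos (by omega))
        omega
      rw [Finset.sum_eq_zero hz]
      simp

lemma sdiv_one_mul_two (N : ℕ) : sdiv 1 N * 2 = N * (N + 1) := by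
  induction N with
  | zero => simp [sdiv]
  | succ N ih =>
    have hstep : sdiv 1 (N + 1) = sdiv 1 N + (N + 1) := by
      unfold sdiv
      rw [Finset.sum_Icc_succ_top (by omega : 1 ≤ N + 1)]
      simp
    rw [hstep, add_mul, ih]
    ring

-- ===== VERDICT (by name: the statement is the Claim_ definition above) =====
theorem factorial_to_factorial_spec : Claim_equal_factorial_to_factorial := by
  intro n _
  unfold Spec_factorial_to_factorial factorial_to_factorial factorial_to_factorial_alt
  by_cases hn : n ≤ 0
  · rw [aLoop, dif_neg (by omega), if_pos hn]
  · rw [if_neg hn]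
    have hn0 : 0 ≤ n := by omega
    set N := n.toNat with hN
    set m := N + 1 with hm
    have hNpow : N < 5 ^ m :=
      lt_of_lt_of_le (Nat.lt_pow_self (by norm_num)) (Nat.pow_le_pow_right (by norm_num) (by omega))
    have hltA : n < (5 : ℤ) * 5 ^ m := by
      rw [show ((5:ℤ) * 5 ^ m) = ((5 ^ (m + 1) : ℕ) : ℤ) from by push_cast; ring]
      have : 5 ^ m ≤ 5 ^ (m + 1) := Nat.pow_le_pow_right (by norm_num) (by omega)
      omega
    have hltB : n < (1 : ℤ) * 5 ^ (m + 1) := by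
      rw [show ((1:ℤ) * 5 ^ (m + 1)) = ((5 ^ (m + 1) : ℕ) : ℤ) from by push_cast; ring]
      have : 5 ^ m ≤ 5 ^ (m + 1) := Nat.pow_le_pow_right (by norm_num) (by omega)
      omega
    rw [aLoop_eq n hn0 m 5 0 (by norm_num) hltA,
      bLoop_eq n hn0 (m + 1) 1 0 (by norm_num) hltB]
    simp only [show (5 : ℤ).toNat = 5 from rfl, show (1 : ℤ).toNat = 1 from rfl, one_mul, zero_add]
    rw [← hN]
    -- A's sum as ∑_{j<m} sdiv (5^(j+1)) N
    have hAs : (∑ j ∈ Finset.range m, sdiv (5 * 5 ^ j) N) = ∑ j ∈ Finset.range m, sdiv (5 ^ (j + 1)) N :=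
      Finset.sum_congr rfl (fun j _ => by rw [show 5 * 5 ^ j = 5 ^ (j + 1) from by ring])
    rw [hAs]
    -- digit_sum in ℤ, split level by level
    have hDS : ((∑ j ∈ Finset.range (m + 1), dsum (5 ^ j) N : ℕ) : ℤ)
        = ∑ j ∈ Finset.range (m + 1),
            (((sdiv (5 ^ j) N : ℕ) : ℤ) - 5 * ((sdiv (5 ^ (j + 1)) N : ℕ) : ℤ)) := by
      push_cast
      apply Finset.sum_congr rfl
      intro j _
      have := dsum_split (5 ^ j) N
      rw [show (5 : ℕ) ^ j * 5 = 5 ^ (j + 1) from by ring] at this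
      linarith
    -- n*(n+1)//2 = sdiv 1 N
    have hS0 : PySem.Int.floordiv (n * (n + 1)) 2 = ((sdiv 1 N : ℕ) : ℤ) := by
      have ha : n = ((N : ℕ) : ℤ) := by omega
      rw [ha, show (((N : ℕ) : ℤ) * (((N : ℕ) : ℤ) + 1)) = ((N * (N + 1) : ℕ) : ℤ) by push_cast; ring,
        show (2 : ℤ) = ((2 : ℕ) : ℤ) from rfl, PySem.Int.floordiv_natCast]
      have h2 := sdiv_one_mul_two N
      omega
    rw [hS0, hDS]
    -- telescope: sdiv 1 N - ∑_{j<m+1}(S_j - 5 S_{j+1}) = 4 * ∑_{j<m} S_{j+1}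
    have hsplit : ∑ j ∈ Finset.range (m + 1),
            (((sdiv (5 ^ j) N : ℕ) : ℤ) - 5 * ((sdiv (5 ^ (j + 1)) N : ℕ) : ℤ))
        = (∑ j ∈ Finset.range (m + 1), ((sdiv (5 ^ j) N : ℕ) : ℤ))
          - 5 * ∑ j ∈ Finset.range (m + 1), ((sdiv (5 ^ (j + 1)) N : ℕ) : ℤ) := by
      rw [Finset.sum_sub_distrib, Finset.mul_sum]
    have h1 : (∑ j ∈ Finset.range (m + 1), ((sdiv (5 ^ j) N : ℕ) : ℤ))
        = (∑ j ∈ Finset.range m, ((sdiv (5 ^ (j + 1)) N : ℕ) : ℤ)) + ((sdiv (5 ^ 0) N : ℕ) : ℤ) :=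
      Finset.sum_range_succ' _ m
    have h2 : (∑ j ∈ Finset.range (m + 1), ((sdiv (5 ^ (j + 1)) N : ℕ) : ℤ))
        = (∑ j ∈ Finset.range m, ((sdiv (5 ^ (j + 1)) N : ℕ) : ℤ)) + ((sdiv (5 ^ (m + 1)) N : ℕ) : ℤ) :=
      Finset.sum_range_succ _ m
    have hzm : sdiv (5 ^ (m + 1)) N = 0 := by
      apply sdiv_eq_zero
      have : 5 ^ m ≤ 5 ^ (m + 1) := Nat.pow_le_pow_right (by norm_num) (by omega)
      omega
    have hfour : ((sdiv 1 N : ℕ) : ℤ)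
          - (∑ j ∈ Finset.range (m + 1),
              (((sdiv (5 ^ j) N : ℕ) : ℤ) - 5 * ((sdiv (5 ^ (j + 1)) N : ℕ) : ℤ)))
        = ((4 * ∑ j ∈ Finset.range m, sdiv (5 ^ (j + 1)) N : ℕ) : ℤ) := by
      rw [hsplit, h1, h2, hzm]
      simp only [pow_zero]
      push_cast
      ring
    rw [hfour, show (4 : ℤ) = ((4 : ℕ) : ℤ) from rfl, PySem.Int.floordiv_natCast,
      Nat.mul_div_cancel_left _ (by norm_num)]
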